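-- pv_equiv track=rewrite | github.com/zaneck/evolveRobots | fitness.py | matriceTocouple
-- ===== SOURCE A (Python) =====
-- def matriceTocouple(m, x, y):
--         res = []
--         cpt = 0
--         for i in range(x):
--                 for j in range(y):
--                         if m[i][j] == 1:
--                                 res.append((i,j))
--                                 cpt += 1
--         if cpt ==  x*y:
--             return []
--         return res
-- ===== SOURCE B (Python) =====
-- def matriceTocouple(m, x, y):
--     if x <= 0 or y <= 0:
--         return []
--     res = []
--     k = x * y - 1
--     while k >= 0:
--         i, j = divmod(k, y)
--         if m[i][j] == 1:
--             res.append((i, j))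
--         k -= 1
--     if len(res) == x * y:
--         return []
--     return res[::-1]
-- ===== Notes on version B (the rewrite author's own statement) =====
-- stated objective: alternative
-- what changed: Replaces A's nested row/column for-loops with counter by a single flattened while-loop scanning cell indices k = x*y-1 down to 0, recovering (i,j) with divmod(k,y), collecting hits back-to-front and reversing at the end; the all-ones case is decided by the final list length.
import Mathlib
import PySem

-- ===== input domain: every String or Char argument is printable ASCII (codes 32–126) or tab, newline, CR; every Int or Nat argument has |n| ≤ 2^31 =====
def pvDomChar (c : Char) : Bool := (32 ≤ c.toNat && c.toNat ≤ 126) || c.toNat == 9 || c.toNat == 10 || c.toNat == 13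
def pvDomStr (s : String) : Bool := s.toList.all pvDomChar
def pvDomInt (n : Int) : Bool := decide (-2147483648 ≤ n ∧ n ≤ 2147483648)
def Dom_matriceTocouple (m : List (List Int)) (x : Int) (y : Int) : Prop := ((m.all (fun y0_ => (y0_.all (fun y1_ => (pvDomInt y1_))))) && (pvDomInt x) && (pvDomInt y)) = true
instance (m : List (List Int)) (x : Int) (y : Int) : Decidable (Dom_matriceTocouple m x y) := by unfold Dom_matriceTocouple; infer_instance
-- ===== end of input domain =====

-- B replaces A's nested row/column loops with a single flattened while-loop over cell
-- indices k = x*y-1 .. 0, recovering (i,j) by divmod(k,y) and reversing at the end (alternative).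

-- ===== PORT A =====
def matriceTocouple (m : List (List Int)) (x : Int) (y : Int) : List (Int × Int) :=
  -- res = [], cpt = 0; nested for-loops appending and counting
  let st :=
    (PySem.List.pyRange 0 x 1).foldl (fun (st : List (Int × Int) × Int) i =>
      (PySem.List.pyRange 0 y 1).foldl (fun st j =>
        if PySem.List.pyGetD (PySem.List.pyGetD m i []) j 0 == 1 then
          (st.1 ++ [(i, j)], st.2 + 1)
        else st) st) ([], (0 : Int))
  if st.2 == x * y then [] else st.1

-- ===== PORT B =====
-- the while loop: fuel n means the current value of k is n-1; k decrements to -1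
def matriceTocouple_altLoop (m : List (List Int)) (y : Int) :
    Nat → List (Int × Int) → List (Int × Int)
  | 0, res => res
  | Nat.succ n, res =>
      let i := PySem.Int.floordiv (n : Int) y
      let j := PySem.Int.mod (n : Int) y
      matriceTocouple_altLoop m y n
        (if PySem.List.pyGetD (PySem.List.pyGetD m i []) j 0 == 1 then res ++ [(i, j)] else res)

def matriceTocouple_alt (m : List (List Int)) (x : Int) (y : Int) : List (Int × Int) :=
  if x ≤ 0 ∨ y ≤ 0 then []
  else
    let res := matriceTocouple_altLoop m y (x * y).toNat []
    if (res.length : Int) == x * y then [] else res.reverse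

-- ===== PRECONDITION & SPEC =====
-- Pre_ excludes exactly the inputs where Python A raises IndexError: when both loops run,
-- every visited row index must be in range and every visited row long enough.
def Pre_matriceTocouple (m : List (List Int)) (x : Int) (y : Int) : Prop :=
  0 < x → 0 < y → x ≤ m.length ∧ ∀ row ∈ m.take x.toNat, y ≤ row.length
instance (m : List (List Int)) (x : Int) (y : Int) : Decidable (Pre_matriceTocouple m x y) := by
  unfold Pre_matriceTocouple; infer_instance
def pvWitness_matriceTocouple : List (List Int) × Int × Int := ([[1, 0], [0, 1]], 2, 2)

def Spec_matriceTocouple (m : List (List Int)) (x : Int) (y : Int) (out : List (Int × Int)) : Prop := out = matriceTocouple_alt m x y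
instance (m : List (List Int)) (x : Int) (y : Int) (out : List (Int × Int)) : Decidable (Spec_matriceTocouple m x y out) := by unfold Spec_matriceTocouple; infer_instance

-- ===== CLAIM (what is proved, stated in full; the proofs are below) =====
def Claim_equal_matriceTocouple : Prop := ∀ (m : List (List Int)) (x : Int) (y : Int), Dom_matriceTocouple m x y → Pre_matriceTocouple m x y → Spec_matriceTocouple m x y (matriceTocouple m x y)

-- ===== LEMMAS AND PROOFS =====

-- the cell predicate, the flattened-index decode, and the row-major coordinate list
def pvCell (m : List (List Int)) (i j : Int) : Bool :=
  PySem.List.pyGetD (PySem.List.pyGetD m i []) j 0 == 1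
def pvG (y : Int) (k : Nat) : Int × Int :=
  (PySem.Int.floordiv (k : Int) y, PySem.Int.mod (k : Int) y)
def pvP (m : List (List Int)) (y : Int) (k : Nat) : Bool :=
  pvCell m (pvG y k).1 (pvG y k).2
def pvGrid (m : List (List Int)) (x y : Int) : List (Int × Int) :=
  (PySem.List.pyRange 0 x 1).flatMap (fun i =>
    ((PySem.List.pyRange 0 y 1).filter (fun j => pvCell m i j)).map (fun j => (i, j)))

-- A's inner loop appends the filtered-and-tagged j's and counts them
theorem pv_inner_foldl (f : Int → Int → Bool) (i : Int) :
    ∀ (js : List Int) (st : List (Int × Int) × Int),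
      js.foldl (fun st j => if f i j then (st.1 ++ [(i, j)], st.2 + 1) else st) st
        = (st.1 ++ (js.filter (f i)).map (fun j => (i, j)),
           st.2 + ((js.filter (f i)).length : Int)) := by
  intro js
  induction js with
  | nil => intro st; simp
  | cons j js ih =>
      intro st
      by_cases h : f i j
      · rw [List.foldl_cons, if_pos h, ih, List.filter_cons_of_pos h, Prod.mk.injEq]
        exact ⟨by simp, by simp only [List.length_cons]; push_cast; ring⟩
      · simp [List.foldl_cons, h, ih]

-- A's outer loop produces the row-major coordinate list, counter = its length
theorem pv_outer_foldl (f : Int → Int → Bool) (js : List Int) :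
    ∀ (is : List Int) (st : List (Int × Int) × Int),
      is.foldl (fun st i =>
          js.foldl (fun st j => if f i j then (st.1 ++ [(i, j)], st.2 + 1) else st) st) st
        = (st.1 ++ is.flatMap (fun i => (js.filter (f i)).map (fun j => (i, j))),
           st.2 + ((is.flatMap (fun i => (js.filter (f i)).map (fun j => (i, j)))).length : Int)) := by
  intro is
  induction is with
  | nil => intro st; simp
  | cons i is ih =>
      intro st
      rw [List.foldl_cons, pv_inner_foldl, ih, List.flatMap_cons, Prod.mk.injEq]
      exact ⟨by simp, by simp only [List.length_append, List.length_map]; push_cast; ring⟩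

-- A in closed form
theorem pv_A_eq (m : List (List Int)) (x y : Int) :
    matriceTocouple m x y
      = if ((pvGrid m x y).length : Int) == x * y then [] else pvGrid m x y := by
  simp only [matriceTocouple, pvGrid, pvCell,
    pv_outer_foldl (fun i j => PySem.List.pyGetD (PySem.List.pyGetD m i []) j 0 == 1),
    List.nil_append, Int.zero_add]

-- B's while loop collects the hits of range n in descending order
theorem pv_bloop (m : List (List Int)) (y : Int) :
    ∀ (n : Nat) (res : List (Int × Int)),
      matriceTocouple_altLoop m y n res
        = res ++ (((List.range n).filter (pvP m y)).map (pvG y)).reverse := by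
  intro n
  induction n with
  | zero => intro res; simp [matriceTocouple_altLoop]
  | succ n ih =>
      intro res
      simp only [matriceTocouple_altLoop, ih, List.range_succ, List.filter_append,
        List.map_append, List.reverse_append]
      by_cases h : pvP m y n
      · simp [pvP, pvCell, pvG] at h
        simp [pvP, pvCell, pvG, h]
      · simp [pvP, pvCell, pvG] at h
        simp [pvP, pvCell, pvG, h]

-- decoding a flattened index: divmod(n*yn + r, y) = (n, r) for 0 < y, r < yn
theorem pv_decode (y : Int) (hy : 0 < y) (n r : Nat) (hr : r < y.toNat) :
    pvG y (n * y.toNat + r) = ((n : Int), (r : Int)) := by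
  set yn := y.toNat with hyn
  have hd : (n * yn + r) / yn = n := by
    rw [Nat.mul_comm, Nat.mul_add_div (by omega), Nat.div_eq_of_lt hr]
    omega
  have hm : (n * yn + r) % yn = r := by
    rw [Nat.mul_comm, Nat.mul_add_mod, Nat.mod_eq_of_lt hr]
  rw [pvG, show y = ((yn : Nat) : Int) from (Int.toNat_of_nonneg (by omega)).symm,
    PySem.Int.floordiv_natCast, PySem.Int.mod_natCast, hd, hm]

-- the flattened ascending scan equals the nested row-major scan
theorem pv_chunk (m : List (List Int)) (y : Int) (hy : 0 < y) :
    ∀ (nx : Nat),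
      ((List.range (nx * y.toNat)).filter (pvP m y)).map (pvG y)
        = pvGrid m (nx : Int) y := by
  intro nx
  induction nx with
  | zero => simp [pvGrid, PySem.List.pyRange_one_eq_nil]
  | succ nx ih =>
      have hsplit : List.range ((nx + 1) * y.toNat)
          = List.range (nx * y.toNat) ++ (List.range y.toNat).map (fun r => nx * y.toNat + r) := by
        rw [Nat.succ_mul, List.range_add]
      have hrng : PySem.List.pyRange 0 ((nx : Int) + 1) 1
          = PySem.List.pyRange 0 (nx : Int) 1 ++ [(nx : Int)] := by
        exact PySem.List.pyRange_one_succ_right (by omega)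
      have htail :
          (((List.range y.toNat).map (fun r => nx * y.toNat + r)).filter (pvP m y)).map (pvG y)
            = ((PySem.List.pyRange 0 y 1).filter (fun j => pvCell m (nx : Int) j)).map
                (fun j => ((nx : Int), j)) := by
        rw [List.filter_map, List.map_map, PySem.List.pyRange_one, List.filter_map, List.map_map]
        simp only [Int.sub_zero]
        have : ∀ r ∈ List.range y.toNat,
            ((pvP m y ∘ fun r => nx * y.toNat + r) r
              = ((fun j => pvCell m (nx : Int) j) ∘ fun k : Nat => (0 : Int) + k) r) := by
          intro r hr
          have hr' := List.mem_range.mp hr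
          simp only [Function.comp, pvP, pv_decode y hy nx r hr']
          norm_num
        rw [List.filter_congr this]
        apply List.map_congr_left
        intro r hr
        have hr' := List.mem_range.mp (List.mem_filter.mp hr).1
        simp only [Function.comp, pv_decode y hy nx r hr']
        norm_num
      rw [hsplit, List.filter_append, List.map_append, ih, htail]
      simp only [pvGrid]
      rw [show ((nx + 1 : Nat) : Int) = (nx : Int) + 1 by push_cast; ring, hrng,
        List.flatMap_append, List.flatMap_cons, List.flatMap_nil, List.append_nil]

-- both ports in the same closed form, hence equal
theorem pv_main (m : List (List Int)) (x y : Int) :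
    matriceTocouple m x y = matriceTocouple_alt m x y := by
  rw [pv_A_eq]
  by_cases hxy : x ≤ 0 ∨ y ≤ 0
  · have hnil : pvGrid m x y = [] := by
      rcases hxy with hx | hy
      · simp [pvGrid, PySem.List.pyRange_one_eq_nil (show x ≤ 0 from hx)]
      · simp [pvGrid, PySem.List.pyRange_one_eq_nil (show y ≤ 0 from hy)]
    rw [matriceTocouple_alt, if_pos hxy, hnil]
    split <;> rfl
  · have hx : 0 < x := by omega
    have hy : 0 < y := by omega
    have hN : (x * y).toNat = x.toNat * y.toNat := by
      rw [show x * y = ((x.toNat : Nat) : Int) * ((y.toNat : Nat) : Int) by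
        rw [Int.toNat_of_nonneg (by omega), Int.toNat_of_nonneg (by omega)],
        ← Nat.cast_mul, Int.toNat_natCast]
    have hGrid : pvGrid m ((x.toNat : Nat) : Int) y = pvGrid m x y := by
      simp only [pvGrid, Int.toNat_of_nonneg (show (0:Int) ≤ x by omega)]
    have hB : matriceTocouple_alt m x y
        = if ((pvGrid m x y).length : Int) == x * y then [] else pvGrid m x y := by
      rw [matriceTocouple_alt, if_neg hxy]
      simp only [pv_bloop, List.nil_append, hN, pv_chunk m y hy x.toNat, hGrid,
        List.length_reverse, List.reverse_reverse]
    rw [hB]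

-- ===== VERDICT (by name: the statement is the Claim_ definition above) =====
theorem matriceTocouple_spec : Claim_equal_matriceTocouple := by
  intro m x y _ _
  unfold Spec_matriceTocouple
  exact pv_main m x y
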